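-- pv_equiv track=rewrite | github.com/2100080051/prepedge-AI | backend/app/security.py | check_xss_injection
-- ===== SOURCE A (Python) =====
-- def check_xss_injection(value: str) -> bool:
--     """
--     Detect potential XSS attacks
--     Returns True if suspicious, False if safe
--     """
--     xss_patterns = [
--         r'<script',
--         r'javascript:',
--         r'onerror=',
--         r'onload=',
--         r'onclick=',
--         r'<iframe',
--         r'<object',
--         r'<embed',
--     ]
--
--     value_lower = value.lower()
--     for pattern in xss_patterns:
--         if pattern in value_lower:
--             return True  # Suspicious
--
--     return False  # Safe
-- ===== SOURCE B (Python) =====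
-- XSS_PATTERNS = (
--     '<script',
--     'javascript:',
--     'onerror=',
--     'onload=',
--     'onclick=',
--     '<iframe',
--     '<object',
--     '<embed',
-- )
--
--
-- def check_xss_injection(value: str) -> bool:
--     """Single left-to-right scan: at each position test whether any
--     pattern starts there, instead of one independent substring pass
--     per pattern."""
--     value_lower = value.lower()
--     return any(
--         value_lower.startswith(p, i)
--         for i in range(len(value_lower))
--         for p in XSS_PATTERNS
--     )
-- ===== Notes on version B (the rewrite author's own statement) =====
-- stated objective: alternative
-- what changed: A runs one independent substring-containment pass per pattern with an early return; B lowers the string once and makes a single left-to-right scan over positions, testing at each position whether any of the eight patterns starts there via startswith with a start offset.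
import Mathlib
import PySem

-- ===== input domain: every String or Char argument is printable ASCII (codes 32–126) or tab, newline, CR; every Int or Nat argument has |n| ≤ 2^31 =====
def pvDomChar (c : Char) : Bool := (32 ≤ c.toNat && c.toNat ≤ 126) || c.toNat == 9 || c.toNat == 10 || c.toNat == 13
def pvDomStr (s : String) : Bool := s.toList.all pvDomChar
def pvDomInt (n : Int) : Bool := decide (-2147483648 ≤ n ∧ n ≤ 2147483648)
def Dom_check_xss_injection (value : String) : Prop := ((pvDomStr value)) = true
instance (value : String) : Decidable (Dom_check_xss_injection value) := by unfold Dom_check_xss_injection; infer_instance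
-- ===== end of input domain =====

-- B makes one left-to-right scan over positions (startswith at each index) instead of A's
-- eight independent substring passes; same results (objective: alternative).

-- ===== PORT A =====
def xss_patterns_a : List String :=
  ["<script", "javascript:", "onerror=", "onload=", "onclick=", "<iframe", "<object", "<embed"]

-- the 'for pattern in xss_patterns: if pattern in value_lower: return True' loop
def xssLoopA : List String → String → Bool
  | [], _ => false
  | p :: rest, v => if PySem.Str.isIn p v then true else xssLoopA rest v

def check_xss_injection (value : String) : Bool :=
  let value_lower := PySem.Str.lower value
  xssLoopA xss_patterns_a value_lower

-- ===== PORT B =====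
def xss_patterns_b : List String :=
  ["<script", "javascript:", "onerror=", "onload=", "onclick=", "<iframe", "<object", "<embed"]

def check_xss_injection_alt (value : String) : Bool :=
  let value_lower := PySem.Str.lower value
  -- any(value_lower.startswith(p, i) for i in range(len(value_lower)) for p in XSS_PATTERNS);
  -- startswith(p, i) with 0 ≤ i is exactly 'p is a prefix of the drop-i suffix'
  (PySem.List.pyRange 0 (PySem.Str.len value_lower) 1).any fun i =>
    xss_patterns_b.any fun p =>
      PySem.Chars.startswith (value_lower.toList.drop i.toNat) p.toList

-- ===== PRECONDITION & SPEC =====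
def Spec_check_xss_injection (value : String) (out : Bool) : Prop := out = check_xss_injection_alt value
instance (value : String) (out : Bool) : Decidable (Spec_check_xss_injection value out) := by unfold Spec_check_xss_injection; infer_instance

-- ===== CLAIM (what is proved, stated in full; the proofs are below) =====
def Claim_equal_check_xss_injection : Prop := ∀ (value : String), Dom_check_xss_injection value → Spec_check_xss_injection value (check_xss_injection value)

-- ===== LEMMAS AND PROOFS =====

theorem xssLoopA_eq_any (ps : List String) (v : String) :
    xssLoopA ps v = ps.any (fun p => PySem.Str.isIn p v) := by
  induction ps with
  | nil => rfl
  | cons p rest ih =>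
      simp only [xssLoopA, List.any_cons, ih]
      cases PySem.Str.isIn p v <;> simp

-- 'sub occurs in s' ↔ 'sub starts at some position i < s.length', for nonempty sub
theorem isIn_iff_exists_pos (sub s : List Char) (hsub : sub ≠ []) :
    PySem.Chars.isIn sub s = true ↔
      ∃ i : Int, (0 ≤ i ∧ i < (s.length : Int)) ∧
        PySem.Chars.startswith (s.drop i.toNat) sub = true := by
  rw [← PySem.Chars.exists_prefix_drop_iff_isIn]
  constructor
  · rintro ⟨j, hj⟩
    refine ⟨(j : Int), ⟨by positivity, ?_⟩, ?_⟩
    · by_contra h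
      push_cast at h
      have hge : s.length ≤ j := by omega
      rw [List.drop_eq_nil_of_le hge] at hj
      exact hsub (List.prefix_nil.mp hj)
    · rw [PySem.Chars.startswith_iff _ _]
      simpa using hj
  · rintro ⟨i, ⟨h0, _⟩, h⟩
    exact ⟨i.toNat, (PySem.Chars.startswith_iff _ _).mp h⟩

theorem eq_of_all (value : String) :
    check_xss_injection value = check_xss_injection_alt value := by
  unfold check_xss_injection check_xss_injection_alt
  rw [xssLoopA_eq_any]
  rw [Bool.eq_iff_iff]
  set v := PySem.Str.lower value with hv
  simp only [List.any_eq_true, PySem.Str.isIn_eq, PySem.List.mem_pyRange_one,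
    PySem.Str.len_eq]
  constructor
  · rintro ⟨p, hp, hin⟩
    have hne : p.toList ≠ [] := by
      fin_cases hp <;> simp
    obtain ⟨i, ⟨h0, hlt⟩, hsw⟩ := (isIn_iff_exists_pos p.toList v.toList hne).mp hin
    refine ⟨i, ⟨h0, by simpa using hlt⟩, p, ?_, hsw⟩
    simpa [xss_patterns_a, xss_patterns_b] using hp
  · rintro ⟨i, ⟨h0, hlt⟩, p, hp, hsw⟩
    have hne : p.toList ≠ [] := by
      fin_cases hp <;> simp
    refine ⟨p, by simpa [xss_patterns_a, xss_patterns_b] using hp, ?_⟩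
    exact (isIn_iff_exists_pos p.toList v.toList hne).mpr ⟨i, ⟨h0, by simpa using hlt⟩, hsw⟩

-- ===== VERDICT (by name: the statement is the Claim_ definition above) =====
theorem check_xss_injection_spec : Claim_equal_check_xss_injection := by
  intro value _
  unfold Spec_check_xss_injection
  exact eq_of_all value
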